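-- pv_equiv track=rewrite | github.com/WanneWisse/BeamerSoftware | api_manager.py | create_pages
-- ===== SOURCE A (Python) =====
-- def create_pages(lyrics):
--     pages_with_text = []
--
--     amount_n = 0
--     current_text_page = ""
--     for characters in lyrics:
--         if characters == "\n":
--             if current_text_page != "":
--                 amount_n += 1
--                 current_text_page += characters
--         else:
--             amount_n = 0
--             current_text_page += characters
--         if amount_n == 2:
--             pages_with_text.append(current_text_page)
--             current_text_page = ""
--             amount_n = 0
--     pages_with_text.append(current_text_page)
--     return pages_with_text
-- ===== SOURCE B (Python) =====
-- def create_pages(lyrics):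
--     pages = []
--     s = lyrics
--     while True:
--         s = s.lstrip('\n')
--         idx = s.find('\n\n')
--         if idx == -1:
--             pages.append(s)
--             return pages
--         pages.append(s[:idx + 2])
--         s = s[idx + 2:]
-- ===== Notes on version B (the rewrite author's own statement) =====
-- stated objective: idiomatic
-- what changed: Replaces the char-by-char state machine with a newline counter by a search-and-slice loop: strip leading newlines, find the next double-newline delimiter, slice the page off with the delimiter attached, repeat.
import Mathlib
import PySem

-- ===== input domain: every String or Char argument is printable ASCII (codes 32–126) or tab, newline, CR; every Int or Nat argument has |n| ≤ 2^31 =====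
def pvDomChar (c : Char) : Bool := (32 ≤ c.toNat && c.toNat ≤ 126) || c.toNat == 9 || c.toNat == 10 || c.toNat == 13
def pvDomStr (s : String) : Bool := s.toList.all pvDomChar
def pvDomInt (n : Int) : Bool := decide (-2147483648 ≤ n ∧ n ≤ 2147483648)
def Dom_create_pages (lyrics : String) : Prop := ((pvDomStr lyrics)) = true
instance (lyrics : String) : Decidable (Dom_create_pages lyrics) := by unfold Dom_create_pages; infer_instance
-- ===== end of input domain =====

-- B replaces A's char-by-char state machine (newline counter) by an idiomatic search-and-slice
-- loop: strip leading newlines, find the next "\n\n", slice the page off; same cost.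
-- Strings are modelled as List Char internally (String.toList / String.ofList at the boundary).

-- ===== PORT A =====
-- state: pages so far, amount_n, current_text_page; each char handled exactly as in A.
def createPagesGo : List Char → List (List Char) → Nat → List Char → List (List Char)
  | [], pages, _, cur => pages ++ [cur]
  | c :: rest, pages, n, cur =>
    let st : Nat × List Char :=
      if c = '\n' then
        (if cur ≠ [] then (n + 1, cur ++ [c]) else (n, cur))
      else (0, cur ++ [c])
    if st.1 = 2 then createPagesGo rest (pages ++ [st.2]) 0 []
    else createPagesGo rest pages st.1 st.2

def create_pages (lyrics : String) : List String :=
  (createPagesGo lyrics.toList [] 0 []).map String.ofList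

-- ===== PORT B =====
-- exact port of s.find("\n\n"): index of the first occurrence, none for Python's -1.
def find2 : List Char → Option Nat
  | [] => none
  | [_] => none
  | a :: b :: t => if a = '\n' ∧ b = '\n' then some 0 else (find2 (b :: t)).map (· + 1)

lemma find2_some_le : ∀ (s : List Char) (i : Nat), find2 s = some i → i + 2 ≤ s.length
  | [], i, h => by simp [find2] at h
  | [_], i, h => by simp [find2] at h
  | a :: b :: t, i, h => by
    by_cases hab : a = '\n' ∧ b = '\n'
    · simp [find2, hab] at h; simp [← h]
    · simp [find2, hab] at h
      obtain ⟨j, hj, rfl⟩ := h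
      have := find2_some_le (b :: t) j hj
      simp only [List.length_cons] at this ⊢
      omega

-- each round: s.lstrip('\n') is dropWhile (= '\n'); s[:idx+2] / s[idx+2:] are take / drop.
def altGo (s : List Char) : List (List Char) :=
  match h : find2 (s.dropWhile (· = '\n')) with
  | none => [s.dropWhile (· = '\n')]
  | some i =>
    (s.dropWhile (· = '\n')).take (i + 2) :: altGo ((s.dropWhile (· = '\n')).drop (i + 2))
termination_by s.length
decreasing_by
  have h1 := find2_some_le _ _ h
  have h2 : (s.dropWhile (· = '\n')).length ≤ s.length := List.length_dropWhile_le _ _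
  simp only [List.length_drop]
  omega

def create_pages_alt (lyrics : String) : List String :=
  (altGo lyrics.toList).map String.ofList

-- ===== PRECONDITION & SPEC =====
def Spec_create_pages (lyrics : String) (out : List String) : Prop := out = create_pages_alt lyrics
instance (lyrics : String) (out : List String) : Decidable (Spec_create_pages lyrics out) := by unfold Spec_create_pages; infer_instance

-- ===== CLAIM (what is proved, stated in full; the proofs are below) =====
def Claim_equal_create_pages : Prop := ∀ (lyrics : String), Dom_create_pages lyrics → Spec_create_pages lyrics (create_pages lyrics)

-- ===== LEMMAS AND PROOFS =====

-- invariant helper: amount_n is 1 exactly when current page ends with '\n' (else 0)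
def nOf (cur : List Char) : Nat := if cur.getLast? = some '\n' then 1 else 0

lemma dropWhile_self {l : List Char} (h : l.head? ≠ some '\n') :
    l.dropWhile (· = '\n') = l := by
  cases l with
  | nil => simp
  | cons a t =>
    have ha : a ≠ '\n' := by simpa using h
    simp [List.dropWhile_cons, ha]

-- appending a char that does not create "\n\n" keeps find2 = none
lemma find2_append_none : ∀ (cur : List Char) (c : Char), find2 cur = none →
    (c ≠ '\n' ∨ cur.getLast? ≠ some '\n') → find2 (cur ++ [c]) = none
  | [], c, _, _ => by simp [find2]
  | [a], c, _, hc => by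
    have : ¬ (a = '\n' ∧ c = '\n') := by
      rcases hc with h | h
      · tauto
      · intro ⟨h1, _⟩; simp [h1] at h
    simp [find2, this]
  | a :: b :: t, c, hn, hc => by
    simp only [find2] at hn
    by_cases hab : a = '\n' ∧ b = '\n'
    · simp [hab] at hn
    · simp [hab] at hn
      have hlast : (a :: b :: t).getLast? = (b :: t).getLast? := by
        simp [List.getLast?_cons_cons]
      have harg : c ≠ '\n' ∨ (b :: t).getLast? ≠ some '\n' := by
        rcases hc with h | h
        · exact Or.inl h
        · exact Or.inr (hlast ▸ h)
      have h2 : find2 (b :: (t ++ [c])) = none := find2_append_none (b :: t) c hn harg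
      simp only [List.cons_append, find2, if_neg hab]
      simp [h2]

-- cur ends in '\n' and has no "\n\n": appending another '\n' puts the first "\n\n" at |cur|-1
lemma find2_append_nl : ∀ (cur : List Char) (rest : List Char), find2 cur = none →
    cur.getLast? = some '\n' → find2 (cur ++ '\n' :: rest) = some (cur.length - 1)
  | [], rest, _, hl => by simp at hl
  | [a], rest, _, hl => by
    simp at hl
    subst hl
    simp [find2]
  | a :: b :: t, rest, hn, hl => by
    simp only [find2] at hn
    by_cases hab : a = '\n' ∧ b = '\n'
    · simp [hab] at hn
    · simp [hab] at hn
      have hlast : (b :: t).getLast? = some '\n' := by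
        rw [List.getLast?_cons_cons] at hl; exact hl
      have h2 : find2 (b :: (t ++ '\n' :: rest)) = some ((b :: t).length - 1) :=
        find2_append_nl (b :: t) rest hn hlast
      simp only [List.cons_append, find2, if_neg hab, h2, Option.map_some]
      simp only [Option.some.injEq, List.length_cons]
      omega

-- unfolding lemmas for altGo (its match carries an equation, so rewrite via cases)
lemma altGo_none {s : List Char} (h0 : find2 (s.dropWhile (· = '\n')) = none) :
    altGo s = [s.dropWhile (· = '\n')] := by
  rw [altGo]
  split
  · rfl
  · next i hi => rw [h0] at hi; cases hi

lemma altGo_some {s : List Char} {i : Nat} (h0 : find2 (s.dropWhile (· = '\n')) = some i) :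
    altGo s = (s.dropWhile (· = '\n')).take (i + 2) ::
      altGo ((s.dropWhile (· = '\n')).drop (i + 2)) := by
  rw [altGo]
  split
  · next hn => rw [h0] at hn; cases hn
  · next j hj =>
    rw [h0] at hj
    cases hj
    rfl

lemma altGo_cons_nl (s : List Char) : altGo ('\n' :: s) = altGo s := by
  have hdc : ('\n' :: s).dropWhile (· = '\n') = s.dropWhile (· = '\n') := by
    simp
  cases hcase : find2 (s.dropWhile (· = '\n')) with
  | none => rw [altGo_none (by rw [hdc]; exact hcase), altGo_none hcase, hdc]
  | some i => rw [altGo_some (by rw [hdc]; exact hcase), altGo_some hcase, hdc]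

-- one flush step of B: a "\n\n"-free page ending in '\n' followed by '\n' is sliced off whole
lemma altGo_flush {cur : List Char} (rest : List Char) (hf : find2 cur = none)
    (hh : cur.head? ≠ some '\n') (hc : cur ≠ []) (hl : cur.getLast? = some '\n') :
    altGo (cur ++ '\n' :: rest) = (cur ++ ['\n']) :: altGo rest := by
  have hdw : (cur ++ '\n' :: rest).dropWhile (· = '\n') = cur ++ '\n' :: rest := by
    apply dropWhile_self
    cases cur with
    | nil => exact absurd rfl hc
    | cons a t => simpa using hh
  have hlen : cur.length ≠ 0 := by simpa using hc
  rw [altGo_some (by rw [hdw]; exact find2_append_nl cur rest hf hl), hdw]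
  have h2 : cur.length - 1 + 2 = cur.length + 1 := by omega
  rw [h2]
  have ht : (cur ++ '\n' :: rest).take (cur.length + 1) = cur ++ ['\n'] := by
    have := List.take_length_add_append (l₁ := cur) (l₂ := '\n' :: rest) 1
    simpa using this
  have hd : (cur ++ '\n' :: rest).drop (cur.length + 1) = rest := by
    have := List.drop_length_add_append (l₁ := cur) (l₂ := '\n' :: rest) 1
    simpa using this
  rw [ht, hd]

-- the heart: A's loop from an invariant state equals pages ++ B's result on cur ++ s
lemma main_lemma : ∀ (s cur : List Char) (pages : List (List Char)),
    find2 cur = none → cur.head? ≠ some '\n' →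
    createPagesGo s pages (nOf cur) cur = pages ++ altGo (cur ++ s) := by
  intro s
  induction s with
  | nil =>
    intro cur pages hf hh
    rw [List.append_nil, altGo_none (by rw [dropWhile_self hh]; exact hf), dropWhile_self hh]
    simp [createPagesGo]
  | cons c rest ih =>
    intro cur pages hf hh
    by_cases hc : c = '\n'
    · subst hc
      by_cases hcur : cur = []
      · subst hcur
        simp only [createPagesGo, nOf, List.getLast?_nil]
        simp only [reduceIte, List.nil_append]
        rw [altGo_cons_nl]
        have := ih [] pages (by simp [find2]) (by simp)
        simpa [nOf] using this
      · by_cases hl : cur.getLast? = some '\n'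
        · -- amount_n reaches 2: flush the page
          have hn : nOf cur = 1 := by simp [nOf, hl]
          simp only [createPagesGo, if_pos hcur, hn]
          norm_num
          have := ih [] (pages ++ [cur ++ ['\n']]) (by simp [find2]) (by simp)
          rw [show nOf [] = 0 from by simp [nOf]] at this
          rw [this, altGo_flush rest hf hh hcur hl]
          simp
        · -- first newline on a nonempty page
          have hn : nOf cur = 0 := by simp [nOf, hl]
          simp only [createPagesGo, if_pos hcur, hn]
          norm_num
          have hf' : find2 (cur ++ ['\n']) = none := find2_append_none cur '\n' hf (.inr hl)
          have hh' : (cur ++ ['\n']).head? ≠ some '\n' := by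
            cases cur with
            | nil => exact absurd rfl hcur
            | cons a t => simpa using hh
          have := ih (cur ++ ['\n']) pages hf' hh'
          rw [show nOf (cur ++ ['\n']) = 1 from by simp [nOf]] at this
          rw [this]
          simp
    · -- ordinary character
      simp only [createPagesGo, if_neg hc]
      norm_num
      have hf' : find2 (cur ++ [c]) = none := find2_append_none cur c hf (.inl hc)
      have hh' : (cur ++ [c]).head? ≠ some '\n' := by
        cases cur with
        | nil => simpa using hc
        | cons a t => simpa using hh
      have := ih (cur ++ [c]) pages hf' hh'
      rw [show nOf (cur ++ [c]) = 0 from by simp [nOf, hc]] at this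
      rw [this]
      simp

-- ===== VERDICT (by name: the statement is the Claim_ definition above) =====
theorem create_pages_spec : Claim_equal_create_pages := by
  intro lyrics _
  unfold Spec_create_pages create_pages create_pages_alt
  have := main_lemma lyrics.toList [] [] (by simp [find2]) (by simp)
  rw [show nOf [] = 0 from by simp [nOf]] at this
  rw [this]
  simp
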